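-- pv_equiv track=rewrite | github.com/Mariorgi/vk_get_photo | main.py | get_large_size
-- ===== SOURCE A (Python) =====
-- def get_large_size(sizes):
-- 	size_types = ['w', 'z', 'y', 'r', 'q', 'p', 'o', 'x', 'm', 's']
-- 	small_index = len(size_types) - 1
-- 	size_element_id = 0
-- 	for i, item_size in enumerate(sizes):
-- 		photo_size_type = item_size['type']
-- 		size_type_index = size_types.index(photo_size_type)
-- 		if size_type_index < small_index:
-- 			small_index = size_types.index(photo_size_type)
-- 			size_element_id = i
-- 			continue
--
-- 		elif size_type_index > small_index:
-- 			continue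
--
-- 	return size_element_id
-- ===== SOURCE B (Python) =====
-- def get_large_size(sizes):
--     order = ['w', 'z', 'y', 'r', 'q', 'p', 'o', 'x', 'm', 's']
--     pr = {t: i for i, t in enumerate(order)}
--     if not sizes:
--         return 0
--     prios = [pr[s['type']] for s in sizes]
--     return prios.index(min(prios))
-- ===== Notes on version B (the rewrite author's own statement) =====
-- stated objective: alternative
-- what changed: Replaces A's single running-minimum loop with running index/state bookkeeping by a priority dict built once, a comprehension mapping each photo to its priority, then min() and list.index() to locate the first best element.
import Mathlib
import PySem

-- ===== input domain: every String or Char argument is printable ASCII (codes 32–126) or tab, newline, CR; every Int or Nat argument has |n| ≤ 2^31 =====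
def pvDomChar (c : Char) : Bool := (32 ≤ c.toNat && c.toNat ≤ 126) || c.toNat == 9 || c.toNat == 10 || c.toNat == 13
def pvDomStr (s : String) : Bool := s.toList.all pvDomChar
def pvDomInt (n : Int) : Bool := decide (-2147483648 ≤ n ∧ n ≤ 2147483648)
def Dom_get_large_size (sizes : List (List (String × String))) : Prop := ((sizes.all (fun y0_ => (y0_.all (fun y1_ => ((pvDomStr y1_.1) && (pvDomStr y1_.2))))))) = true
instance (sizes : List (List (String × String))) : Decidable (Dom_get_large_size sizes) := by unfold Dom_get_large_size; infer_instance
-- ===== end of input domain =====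

-- B replaces A's running-minimum loop with a priority-dict + comprehension + min()/list.index() two-pass locate (alternative decomposition, same cost).


-- ===== PORT A =====
def sizeOrder : List String := ["w", "z", "y", "r", "q", "p", "o", "x", "m", "s"]

-- the for-loop of A: state (small_index, size_element_id), counter i
def glsLoop : List (List (String × String)) → Int → Int → Int → Int
  | [], _, _, sid => sid
  | item :: rest, i, small, sid =>
    match (PySem.Dict.mk item).get? "type" with
    | none => 0  -- Python raises KeyError here; excluded by Pre_
    | some t =>
      match PySem.List.index? sizeOrder t with
      | none => 0  -- Python raises ValueError here; excluded by Pre_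
      | some k =>
        if (k : Int) < small then glsLoop rest (i + 1) (k : Int) i
        else glsLoop rest (i + 1) small sid

def get_large_size (sizes : List (List (String × String))) : Int :=
  glsLoop sizes 0 ((sizeOrder.length : Int) - 1) 0

-- ===== PORT B =====
-- pr = {t: i for i, t in enumerate(order)}
def prDict : PySem.Dict String Int :=
  (PySem.List.enumerate sizeOrder).foldl (fun d p => d.insert p.2 p.1) PySem.Dict.empty

-- pr[s['type']]; the getD defaults stand in for Python's KeyError (excluded by Pre_)
def prio (item : List (String × String)) : Int :=
  (prDict.get? (((PySem.Dict.mk item).get? "type").getD "")).getD 10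

def get_large_size_alt (sizes : List (List (String × String))) : Int :=
  if sizes.isEmpty then 0
  else
    let prios := sizes.map prio
    match PySem.List.min? prios (fun x => x) with
    | none => 0  -- unreachable: prios nonempty
    | some b =>
      match PySem.List.index? prios b with
      | none => 0  -- unreachable: b ∈ prios
      | some j => (j : Int)

-- ===== PRECONDITION & SPEC =====
-- Pre_ excludes exactly the inputs on which A raises: an element without a 'type'
-- key (KeyError) or with a type outside the ten known size types (ValueError).
def Pre_get_large_size (sizes : List (List (String × String))) : Prop :=
  ∀ item ∈ sizes, (((PySem.Dict.mk item).get? "type").any (fun t => sizeOrder.contains t)) = true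
instance (sizes : List (List (String × String))) : Decidable (Pre_get_large_size sizes) := by
  unfold Pre_get_large_size; infer_instance

def pvWitness_get_large_size : (List (List (String × String))) :=
  [[("type", "x"), ("url", "u1")], [("type", "w")], [("type", "s")]]

def Spec_get_large_size (sizes : List (List (String × String))) (out : Int) : Prop := out = get_large_size_alt sizes
instance (sizes : List (List (String × String))) (out : Int) : Decidable (Spec_get_large_size sizes out) := by unfold Spec_get_large_size; infer_instance

-- ===== CLAIM (what is proved, stated in full; the proofs are below) =====
def Claim_equal_get_large_size : Prop := ∀ (sizes : List (List (String × String))), Dom_get_large_size sizes → Pre_get_large_size sizes → Spec_get_large_size sizes (get_large_size sizes)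

-- ===== LEMMAS AND PROOFS =====

-- for every known size type, B's dict lookup agrees with A's list.index, and the priority is ≤ 9
lemma key_facts : ∀ t ∈ sizeOrder,
    (match PySem.List.index? sizeOrder t with
     | some k => decide (prDict.get? t = some (k : Int) ∧ k ≤ 9)
     | none => false) = true := by decide

lemma foldl_min_le (l : List Int) : ∀ a : Int, l.foldl min a ≤ a := by
  induction l with
  | nil => simp
  | cons c l ih => intro a; exact le_trans (ih (min a c)) (min_le_left a c)

-- pure-list version of A's loop
def fA : List Int → Int → Int → Int → Int
  | [], _, _, s => s
  | p :: rest, i, m, s =>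
    if p < m then fA rest (i + 1) p i else fA rest (i + 1) m s

lemma glsLoop_eq_fA (sizes : List (List (String × String)))
    (hpre : Pre_get_large_size sizes) :
    ∀ i m s, glsLoop sizes i m s = fA (sizes.map prio) i m s := by
  induction sizes with
  | nil => intro i m s; rfl
  | cons item rest ih =>
    intro i m s
    have h1 := hpre item (by simp)
    have hrest : Pre_get_large_size rest := fun x hx => hpre x (by simp [hx])
    cases hget : (PySem.Dict.mk item).get? "type" with
    | none => simp [hget] at h1
    | some t =>
      rw [hget] at h1
      simp only [Option.any_some] at h1
      have hmem : t ∈ sizeOrder := by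
        simpa using h1
      have hk := key_facts t hmem
      cases hidx : PySem.List.index? sizeOrder t with
      | none => rw [hidx] at hk; exact absurd hk (by simp)
      | some k =>
        rw [hidx] at hk
        simp only [decide_eq_true_eq] at hk
        have hprio : prio item = (k : Int) := by
          simp [prio, hget, hk.1]
        simp only [glsLoop, hget, hidx, List.map, fA, hprio]
        split <;> exact ih hrest _ _ _

-- characterization of A's loop: first index of the minimum (offset i) if it improves on m, else s
lemma fA_char : ∀ (ps : List Int) (i m s : Int),
    fA ps i m s =
      if ps.foldl min m < m
      then i + (ps.findIdx (fun x => x == ps.foldl min m) : Int)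
      else s := by
  intro ps
  induction ps with
  | nil => intro i m s; simp [fA]
  | cons p rest ih =>
    intro i m s
    simp only [fA, List.foldl_cons]
    by_cases hpm : p < m
    · rw [if_pos hpm, ih]
      have hmin : min m p = p := by omega
      rw [hmin]
      have hle : rest.foldl min p ≤ p := foldl_min_le rest p
      by_cases hr : rest.foldl min p < p
      · rw [if_pos hr, if_pos (by omega)]
        have hne : (p == rest.foldl min p) = false := by
          simp; omega
        rw [List.findIdx_cons, hne]
        simp only [cond_false]
        push_cast
        ring
      · have heq : rest.foldl min p = p := by omega
        rw [if_neg hr, if_pos (by omega), heq]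
        rw [List.findIdx_cons]
        simp
    · rw [if_neg hpm, ih]
      have hmin : min m p = m := by omega
      rw [hmin]
      by_cases hr : rest.foldl min m < m
      · rw [if_pos hr, if_pos hr]
        have hne : (p == rest.foldl min m) = false := by
          simp; omega
        rw [List.findIdx_cons, hne]
        simp only [cond_false]
        push_cast
        ring
      · rw [if_neg hr, if_neg hr]

lemma prio_le_nine (item : List (String × String))
    (h : (((PySem.Dict.mk item).get? "type").any (fun t => sizeOrder.contains t)) = true) :
    prio item ≤ 9 ∧ 0 ≤ prio item := by
  cases hget : (PySem.Dict.mk item).get? "type" with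
  | none => simp [hget] at h
  | some t =>
    rw [hget] at h
    simp only [Option.any_some] at h
    have hmem : t ∈ sizeOrder := by simpa using h
    have hk := key_facts t hmem
    cases hidx : PySem.List.index? sizeOrder t with
    | none => rw [hidx] at hk; exact absurd hk (by simp)
    | some k =>
      rw [hidx] at hk
      simp only [decide_eq_true_eq] at hk
      have : prio item = (k : Int) := by simp [prio, hget, hk.1]
      rw [this]
      constructor
      · exact_mod_cast hk.2
      · positivity

lemma idxOf?_eq_findIdx {l : List Int} {a : Int} (h : a ∈ l) :
    List.idxOf? a l = some (l.findIdx (fun x => x == a)) := by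
  induction l with
  | nil => cases h
  | cons b t ih =>
    rw [List.idxOf?_cons, List.findIdx_cons]
    by_cases hba : b = a
    · simp [hba]
    · have : (b == a) = false := by simp [hba]
      rw [this]
      have hmem : a ∈ t := by
        cases h with
        | head => exact absurd rfl hba
        | tail _ h => exact h
      simp [ih hmem]

-- ===== VERDICT (by name: the statement is the Claim_ definition above) =====
theorem get_large_size_spec : Claim_equal_get_large_size := by
  intro sizes _hdom hpre
  unfold Spec_get_large_size
  cases sizes with
  | nil => rfl
  | cons item rest =>
    have hple : prio item ≤ 9 := (prio_le_nine item (hpre item (by simp))).1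
    have hA : get_large_size (item :: rest) = fA (prio item :: rest.map prio) 0 9 0 := by
      unfold get_large_size
      rw [glsLoop_eq_fA _ hpre]
      rfl
    have hfold : (prio item :: rest.map prio).foldl min 9 = (rest.map prio).foldl min (prio item) := by
      simp only [List.foldl_cons]
      congr 1
      omega
    have hmin_le := foldl_min_le (rest.map prio) (prio item)
    have hb : (rest.map prio).foldl min (prio item) ∈ (prio item :: rest.map prio) := by
      rcases PySem.List.foldl_min_mem (rest.map prio) (prio item) with h | h
      · rw [h]; exact List.mem_cons_self
      · exact List.mem_cons_of_mem _ h
    rw [hA, fA_char]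
    simp only [List.foldl_cons] at hfold ⊢
    rw [hfold]
    unfold get_large_size_alt
    simp only [List.isEmpty_cons, Bool.false_eq_true, if_false, List.map_cons]
    rw [PySem.List.min?_id_cons]
    dsimp only
    by_cases himp : (rest.map prio).foldl min (prio item) < 9
    · rw [if_pos himp, PySem.List.index?_eq_idxOf?, idxOf?_eq_findIdx hb]
      dsimp only
      simp
    · rw [if_neg himp]
      have hbp : (rest.map prio).foldl min (prio item) = prio item := by omega
      rw [hbp, PySem.List.index?_eq_idxOf?, List.idxOf?_cons]
      simp
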